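-- pv_equiv track=rewrite | github.com/mossytoamin/Terminal-TicTacToe | main.py | check_list_win
-- ===== SOURCE A (Python) =====
-- def check_list_win(move_list):
--     #if a 0 no win.
--     for d in move_list:
--         if d == 0:
--             return False
--
--     #checking if more than one number in list
--     for k in range(1,len(move_list)):
--         if move_list[k] != move_list[k-1]:
--             return False
--
--     return True
-- ===== SOURCE B (Python) =====
-- def check_list_win(move_list):
--     s = set(move_list)
--     return len(s) <= 1 and 0 not in s
-- ===== Notes on version B (the rewrite author's own statement) =====
-- stated objective: simpler
-- what changed: Replaces the zero-scan loop and the adjacent-equality index loop with a single set build followed by a size and membership test (len(set) <= 1 and 0 not in set).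
import Mathlib
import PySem

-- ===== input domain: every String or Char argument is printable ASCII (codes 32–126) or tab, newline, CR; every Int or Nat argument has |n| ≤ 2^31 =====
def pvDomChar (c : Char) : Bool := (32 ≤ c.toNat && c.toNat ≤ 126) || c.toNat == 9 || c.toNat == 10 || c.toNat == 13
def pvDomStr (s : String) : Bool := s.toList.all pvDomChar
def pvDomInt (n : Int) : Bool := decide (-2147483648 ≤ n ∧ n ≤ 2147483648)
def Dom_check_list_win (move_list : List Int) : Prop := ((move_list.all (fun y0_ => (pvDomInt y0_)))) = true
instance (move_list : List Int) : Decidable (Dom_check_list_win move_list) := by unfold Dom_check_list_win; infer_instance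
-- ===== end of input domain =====

-- B replaces A's two sequential scans (zero check, adjacent-equality index loop) by one
-- set build followed by a size test and a membership test; objective: simpler.


-- ===== PORT A =====
-- first loop: 'for d in move_list: if d == 0: return False' (some false = early return)
def clwZeroLoop : List Int → Option Bool
  | [] => none
  | d :: rest => if d = 0 then some false else clwZeroLoop rest

-- second loop: 'for k in range(1, len(move_list)): if move_list[k] != move_list[k-1]: return False'
-- indexing is ported with pyGetD; every index produced by the range is in bounds.
def clwAdjLoop (ml : List Int) : List Int → Option Bool
  | [] => none
  | k :: rest =>
      if PySem.List.pyGetD ml k 0 ≠ PySem.List.pyGetD ml (k - 1) 0 then some false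
      else clwAdjLoop ml rest

def check_list_win (move_list : List Int) : Bool :=
  match clwZeroLoop move_list with
  | some r => r
  | none =>
    match clwAdjLoop move_list (PySem.List.pyRange 1 (move_list.length : Int) 1) with
    | some r => r
    | none => true

-- ===== PORT B =====
-- s = set(move_list); return len(s) <= 1 and 0 not in s
def check_list_win_alt (move_list : List Int) : Bool :=
  let s : PySem.Set Int := PySem.Set.ofList move_list
  decide (PySem.Set.len s ≤ 1) && !(PySem.Set.contains s 0)

-- ===== PRECONDITION & SPEC =====
def Spec_check_list_win (move_list : List Int) (out : Bool) : Prop := out = check_list_win_alt move_list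
instance (move_list : List Int) (out : Bool) : Decidable (Spec_check_list_win move_list out) := by unfold Spec_check_list_win; infer_instance

-- ===== CLAIM (what is proved, stated in full; the proofs are below) =====
def Claim_equal_check_list_win : Prop := ∀ (move_list : List Int), Dom_check_list_win move_list → Spec_check_list_win move_list (check_list_win move_list)

-- ===== LEMMAS AND PROOFS =====

theorem clwZeroLoop_some (l : List Int) (r : Bool) (h : clwZeroLoop l = some r) : r = false := by
  induction l with
  | nil => simp [clwZeroLoop] at h
  | cons a t ih =>
      by_cases ha : a = 0
      · simp [clwZeroLoop, ha] at h; exact h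
      · exact ih (by simpa [clwZeroLoop, ha] using h)

theorem clwAdjLoop_some (ml ks : List Int) (r : Bool) (h : clwAdjLoop ml ks = some r) : r = false := by
  induction ks with
  | nil => simp [clwAdjLoop] at h
  | cons k t ih =>
      by_cases hk : PySem.List.pyGetD ml k 0 = PySem.List.pyGetD ml (k - 1) 0
      · exact ih (by simpa [clwAdjLoop, hk] using h)
      · simp [clwAdjLoop, hk] at h; exact h

theorem clwZeroLoop_eq_none_iff (l : List Int) : clwZeroLoop l = none ↔ ∀ x ∈ l, x ≠ 0 := by
  induction l with
  | nil => simp [clwZeroLoop]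
  | cons a t ih =>
      by_cases h : a = 0 <;> simp [clwZeroLoop, h, ih]

theorem clwAdjLoop_eq_none_iff (ml : List Int) (ks : List Int) :
    clwAdjLoop ml ks = none ↔
      ∀ k ∈ ks, PySem.List.pyGetD ml k 0 = PySem.List.pyGetD ml (k - 1) 0 := by
  induction ks with
  | nil => simp [clwAdjLoop]
  | cons k t ih =>
      by_cases h : PySem.List.pyGetD ml k 0 = PySem.List.pyGetD ml (k - 1) 0 <;>
        simp [clwAdjLoop, h, ih]

-- A returns true iff both loops fall through
theorem check_list_win_true_iff (ml : List Int) :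
    check_list_win ml = true ↔
      (∀ x ∈ ml, x ≠ 0) ∧
      (∀ k ∈ PySem.List.pyRange 1 (ml.length : Int) 1,
        PySem.List.pyGetD ml k 0 = PySem.List.pyGetD ml (k - 1) 0) := by
  unfold check_list_win
  rcases h1 : clwZeroLoop ml with _ | r
  · rcases h2 : clwAdjLoop ml (PySem.List.pyRange 1 (ml.length : Int) 1) with _ | r2
    · exact iff_of_true rfl
        ⟨(clwZeroLoop_eq_none_iff ml).1 h1, (clwAdjLoop_eq_none_iff ml _).1 h2⟩
    · have hr2 : r2 = false := clwAdjLoop_some ml _ r2 h2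
      subst hr2
      refine iff_of_false Bool.false_ne_true ?_
      intro hco
      rw [(clwAdjLoop_eq_none_iff ml _).2 hco.2] at h2
      simp at h2
  · have hr : r = false := clwZeroLoop_some ml r h1
    subst hr
    refine iff_of_false Bool.false_ne_true ?_
    intro hco
    rw [(clwZeroLoop_eq_none_iff ml).2 hco.1] at h1
    simp at h1

-- adjacent equality at all integer indices 1..n-1 ↔ all pairs of elements equal
theorem adj_iff_pairwise_eq (ml : List Int) :
    (∀ k ∈ PySem.List.pyRange 1 (ml.length : Int) 1,
        PySem.List.pyGetD ml k 0 = PySem.List.pyGetD ml (k - 1) 0) ↔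
      ∀ x ∈ ml, ∀ y ∈ ml, x = y := by
  constructor
  · intro h
    have hadj : ∀ j : ℕ, (hj : j + 1 < ml.length) → ml[j + 1] = ml[j] := by
      intro j hj
      have hk := h ((j : Int) + 1) (by
        rw [PySem.List.mem_pyRange_one]
        constructor
        · omega
        · exact_mod_cast Int.ofNat_lt.2 hj)
      have e1 : PySem.List.pyGetD ml ((j : Int) + 1) 0 = ml[((j : Int) + 1).toNat]'(by omega) :=
        PySem.List.pyGetD_eq_getElem ml 0 (by omega) (by exact_mod_cast Int.ofNat_lt.2 hj)
      have e2 : PySem.List.pyGetD ml ((j : Int) + 1 - 1) 0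
          = ml[((j : Int) + 1 - 1).toNat]'(by omega) :=
        PySem.List.pyGetD_eq_getElem ml 0 (by omega) (by omega)
      rw [e1, e2] at hk
      have t1 : ((j : Int) + 1).toNat = j + 1 := by omega
      have t2 : ((j : Int) + 1 - 1).toNat = j := by omega
      simpa [t1, t2] using hk
    have hall : ∀ i : ℕ, (hi : i < ml.length) → ml[i] = ml[0]'(by omega) := by
      intro i
      induction i with
      | zero => intro _; rfl
      | succ j ih => intro hj; rw [hadj j hj]; exact ih (by omega)
    intro x hx y hy
    obtain ⟨i, hi, hxi⟩ := List.mem_iff_getElem.1 hx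
    obtain ⟨j, hj, hyj⟩ := List.mem_iff_getElem.1 hy
    rw [← hxi, ← hyj, hall i hi, hall j hj]
  · intro h k hk
    rw [PySem.List.mem_pyRange_one] at hk
    have h1 : PySem.List.pyGetD ml k 0 ∈ ml :=
      PySem.List.pyGetD_mem ml 0 (by constructor <;> omega)
    have h2 : PySem.List.pyGetD ml (k - 1) 0 ∈ ml :=
      PySem.List.pyGetD_mem ml 0 (by constructor <;> omega)
    exact h _ h1 _ h2

theorem all_eq_of_len_le_one (s : List Int) (h : s.length ≤ 1) :
    ∀ x ∈ s, ∀ y ∈ s, x = y := by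
  match s with
  | [] => simp
  | [a] => simp
  | a :: b :: t => simp at h

theorem len_le_one_of_all_eq (s : List Int) (hnd : s.Nodup)
    (h : ∀ x ∈ s, ∀ y ∈ s, x = y) : s.length ≤ 1 := by
  match s with
  | [] => simp
  | [a] => simp
  | a :: b :: t =>
      exfalso
      have hab : a = b := h a (by simp) b (by simp)
      simp [hab] at hnd

-- B returns true iff all pairs equal and no zero
theorem check_list_win_alt_true_iff (ml : List Int) :
    check_list_win_alt ml = true ↔ (∀ x ∈ ml, ∀ y ∈ ml, x = y) ∧ ∀ x ∈ ml, x ≠ 0 := by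
  unfold check_list_win_alt
  simp only [Bool.and_eq_true, decide_eq_true_eq, Bool.not_eq_true',
    PySem.Set.contains_eq_listContains]
  have hmem : ∀ y : Int, y ∈ PySem.Set.ofList ml ↔ y ∈ ml :=
    fun y => PySem.Set.mem_ofList ml y
  have hlen_eq : PySem.Set.len (PySem.Set.ofList ml)
      = ((PySem.Set.ofList ml).length : Int) := by
    simp [PySem.Set.len]
  constructor
  · rintro ⟨hlen, hc⟩
    have hlen' : (PySem.Set.ofList ml).length ≤ 1 := by
      rw [hlen_eq] at hlen; exact_mod_cast hlen
    have hzero : (0 : Int) ∉ ml := by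
      simp at hc; exact hc
    refine ⟨fun x hx y hy => ?_, fun x hx hx0 => ?_⟩
    · exact all_eq_of_len_le_one _ hlen' x ((hmem x).2 hx) y ((hmem y).2 hy)
    · exact hzero (hx0 ▸ hx)
  · rintro ⟨hall, hz⟩
    refine ⟨?_, ?_⟩
    · rw [hlen_eq]
      have : (PySem.Set.ofList ml).length ≤ 1 :=
        len_le_one_of_all_eq _ (PySem.Set.nodup_ofList ml)
          (fun x hx y hy => hall x ((hmem x).1 hx) y ((hmem y).1 hy))
      exact_mod_cast this
    · have h0 : (0 : Int) ∉ ml := fun hm => hz 0 hm rfl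
      simpa [List.contains_iff_mem, hmem] using h0

-- ===== VERDICT (by name: the statement is the Claim_ definition above) =====
theorem check_list_win_spec : Claim_equal_check_list_win := by
  intro ml _
  unfold Spec_check_list_win
  rw [Bool.eq_iff_iff, check_list_win_true_iff, check_list_win_alt_true_iff,
    adj_iff_pairwise_eq]
  tauto
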